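-- pv_equiv track=rewrite | github.com/KazeTachinuu/epita-coding-style | check.py | _strip_strings_and_chars
-- ===== SOURCE A (Python) =====
-- def _strip_strings_and_chars(line: str) -> str:
--     """Remove string literals and char literals from a line, replacing with spaces.
--
--     This prevents false positives from braces/parens inside literals like:
--     - char c = '{';
--     - char *s = "{ hello }";
--     """
--     result = []
--     i = 0
--     while i < len(line):
--         # Character literal
--         if line[i] == "'" and (i == 0 or line[i-1] != '\\'):
--             result.append(' ')
--             i += 1
--             while i < len(line):
--                 if line[i] == '\\' and i + 1 < len(line):
--                     result.append('  ')
--                     i += 2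
--                 elif line[i] == "'":
--                     result.append(' ')
--                     i += 1
--                     break
--                 else:
--                     result.append(' ')
--                     i += 1
--         # String literal
--         elif line[i] == '"' and (i == 0 or line[i-1] != '\\'):
--             result.append(' ')
--             i += 1
--             while i < len(line):
--                 if line[i] == '\\' and i + 1 < len(line):
--                     result.append('  ')
--                     i += 2
--                 elif line[i] == '"':
--                     result.append(' ')
--                     i += 1
--                     break
--                 else:
--                     result.append(' ')
--                     i += 1
--         else:
--             result.append(line[i])
--             i += 1
--     return ''.join(result)
-- ===== SOURCE B (Python) =====
-- def _strip_strings_and_chars(line: str) -> str: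
--     """Blank out string/char literals: locate each literal's span with one
--     parametrised scanner, then splice untouched segments with runs of spaces."""
--     n = len(line)
--     parts = []
--     start = 0  # start of the pending untouched segment
--     i = 0
--     while i < n:
--         c = line[i]
--         if (c == "'" or c == '"') and (i == 0 or line[i - 1] != '\\'):
--             j = i + 1
--             while j < n:
--                 if line[j] == '\\' and j + 1 < n:
--                     j += 2
--                 elif line[j] == c:
--                     j += 1
--                     break
--                 else:
--                     j += 1
--             parts.append(line[start:i])
--             parts.append(' ' * (j - i))
--             start = j
--             i = j
--         else:
--             i += 1
--     parts.append(line[start:])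
--     return ''.join(parts)
-- ===== Notes on version B (the rewrite author's own statement) =====
-- stated objective: alternative
-- what changed: A emits the output character by character with two duplicated inner loops (one per quote kind); B uses one parametrised span scanner that only computes each literal's end index, then assembles the result from untouched slices and bulk runs of spaces.
import Mathlib
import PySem

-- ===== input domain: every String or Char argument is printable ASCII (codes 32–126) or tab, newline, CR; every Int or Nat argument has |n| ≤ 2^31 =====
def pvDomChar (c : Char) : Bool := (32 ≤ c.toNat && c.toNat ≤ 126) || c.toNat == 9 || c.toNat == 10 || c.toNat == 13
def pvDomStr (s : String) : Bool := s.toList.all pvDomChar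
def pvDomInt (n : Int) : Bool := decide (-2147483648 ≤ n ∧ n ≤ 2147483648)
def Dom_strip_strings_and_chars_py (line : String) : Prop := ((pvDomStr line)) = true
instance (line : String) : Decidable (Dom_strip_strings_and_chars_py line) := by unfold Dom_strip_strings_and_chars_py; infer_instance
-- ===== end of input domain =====

-- B blanks each literal by locating its span with one parametrised scanner and splicing
-- untouched slices with runs of spaces, instead of A's char-by-char emission through two
-- duplicated inner loops; alternative decomposition, same cost.
-- (All loops carry a structural fuel = length+1, a pure totality guard: each iteration
-- advances i by ≥ 1, so fuel is never exhausted from the ports' entry calls.)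

-- ===== PORT A =====
-- A's first inner while loop (after an opening "'"): emits spaces, returns them with the next index.
def pvAInnerChar (l : List Char) (fuel i : Nat) : List Char × Nat :=
  match fuel with
  | 0 => ([], i)
  | f + 1 =>
    if h : i < l.length then
      if l[i] = '\\' ∧ i + 1 < l.length then
        (' ' :: ' ' :: (pvAInnerChar l f (i + 2)).1, (pvAInnerChar l f (i + 2)).2)
      else if l[i] = '\'' then
        ([' '], i + 1)
      else
        (' ' :: (pvAInnerChar l f (i + 1)).1, (pvAInnerChar l f (i + 1)).2)
    else ([], i)

-- A's second inner while loop (after an opening '"'), duplicated in A's source.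
def pvAInnerStr (l : List Char) (fuel i : Nat) : List Char × Nat :=
  match fuel with
  | 0 => ([], i)
  | f + 1 =>
    if h : i < l.length then
      if l[i] = '\\' ∧ i + 1 < l.length then
        (' ' :: ' ' :: (pvAInnerStr l f (i + 2)).1, (pvAInnerStr l f (i + 2)).2)
      else if l[i] = '"' then
        ([' '], i + 1)
      else
        (' ' :: (pvAInnerStr l f (i + 1)).1, (pvAInnerStr l f (i + 1)).2)
    else ([], i)

-- A's outer while loop; 'line[i-1]' is only read when i ≠ 0, so getD's default is never used.
def pvAOuter (l : List Char) (fuel i : Nat) : List Char :=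
  match fuel with
  | 0 => []
  | f + 1 =>
    if h : i < l.length then
      if l[i] = '\'' ∧ (i = 0 ∨ l.getD (i - 1) ' ' ≠ '\\') then
        ' ' :: ((pvAInnerChar l (l.length + 1) (i + 1)).1 ++
                pvAOuter l f (pvAInnerChar l (l.length + 1) (i + 1)).2)
      else if l[i] = '"' ∧ (i = 0 ∨ l.getD (i - 1) ' ' ≠ '\\') then
        ' ' :: ((pvAInnerStr l (l.length + 1) (i + 1)).1 ++
                pvAOuter l f (pvAInnerStr l (l.length + 1) (i + 1)).2)
      else
        l[i] :: pvAOuter l f (i + 1)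
    else []

def strip_strings_and_chars_py (line : String) : String :=
  String.ofList (pvAOuter line.toList (line.toList.length + 1) 0)

-- ===== PORT B =====
-- B's scanner: returns only the index just past the literal opened by quote q.
def pvBScan (q : Char) (l : List Char) (fuel j : Nat) : Nat :=
  match fuel with
  | 0 => j
  | f + 1 =>
    if h : j < l.length then
      if l[j] = '\\' ∧ j + 1 < l.length then pvBScan q l f (j + 2)
      else if l[j] = q then j + 1
      else pvBScan q l f (j + 1)
    else j

-- B's outer loop: collects the untouched slice line[start:i] (= take/drop, exact for
-- 0 ≤ start ≤ i, cf. PySem.List.slice_toNat) and the space run ' '*(j-i) into parts.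
def pvBLoop (l : List Char) (fuel i start : Nat) (parts : List (List Char)) : List (List Char) :=
  match fuel with
  | 0 => parts ++ [l.drop start]
  | f + 1 =>
    if h : i < l.length then
      if (l[i] = '\'' ∨ l[i] = '"') ∧ (i = 0 ∨ l.getD (i - 1) ' ' ≠ '\\') then
        pvBLoop l f (pvBScan l[i] l (l.length + 1) (i + 1)) (pvBScan l[i] l (l.length + 1) (i + 1))
          (parts ++ [(l.drop start).take (i - start),
                     List.replicate (pvBScan l[i] l (l.length + 1) (i + 1) - i) ' '])
      else pvBLoop l f (i + 1) start parts
    else parts ++ [l.drop start]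

def strip_strings_and_chars_py_alt (line : String) : String :=
  String.ofList (pvBLoop line.toList (line.toList.length + 1) 0 0 []).flatten

-- ===== PRECONDITION & SPEC =====
def Spec_strip_strings_and_chars_py (line : String) (out : String) : Prop := out = strip_strings_and_chars_py_alt line
instance (line : String) (out : String) : Decidable (Spec_strip_strings_and_chars_py line out) := by unfold Spec_strip_strings_and_chars_py; infer_instance

-- ===== CLAIM (what is proved, stated in full; the proofs are below) =====
def Claim_equal_strip_strings_and_chars_py : Prop := ∀ (line : String), Dom_strip_strings_and_chars_py line → Spec_strip_strings_and_chars_py line (strip_strings_and_chars_py line)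

-- ===== LEMMAS AND PROOFS =====

theorem pvBScan_ge (q : Char) (l : List Char) (fuel : Nat) :
    ∀ j, j ≤ pvBScan q l fuel j := by
  induction fuel with
  | zero => intro j; simp [pvBScan]
  | succ f ih =>
    intro j
    unfold pvBScan
    split
    · split
      · have := ih (j + 2); omega
      · split
        · omega
        · have := ih (j + 1); omega
    · omega

-- A's inner loops emit exactly one space per consumed character, so with the same fuel
-- they equal (replicate (scan_end - i) ' ', scan_end) for B's scanner of the same quote.
theorem pvAInnerChar_eq_scan (l : List Char) (fuel : Nat) :
    ∀ i, pvAInnerChar l fuel i = (List.replicate (pvBScan '\'' l fuel i - i) ' ', pvBScan '\'' l fuel i) := by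
  induction fuel with
  | zero => intro i; simp [pvAInnerChar, pvBScan]
  | succ f ih =>
    intro i
    unfold pvAInnerChar pvBScan
    split
    · split
      · have hge := pvBScan_ge '\'' l f (i + 2)
        rw [ih (i + 2)]
        rw [show pvBScan '\'' l f (i + 2) - i = (pvBScan '\'' l f (i + 2) - (i + 2)) + 2 from by omega,
          List.replicate_succ, List.replicate_succ]
      · split
        · simp
        · have hge := pvBScan_ge '\'' l f (i + 1)
          rw [ih (i + 1)]
          rw [show pvBScan '\'' l f (i + 1) - i = (pvBScan '\'' l f (i + 1) - (i + 1)) + 1 from by omega,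
            List.replicate_succ]
    · simp
theorem pvAInnerStr_eq_scan (l : List Char) (fuel : Nat) :
    ∀ i, pvAInnerStr l fuel i = (List.replicate (pvBScan '"' l fuel i - i) ' ', pvBScan '"' l fuel i) := by
  induction fuel with
  | zero => intro i; simp [pvAInnerStr, pvBScan]
  | succ f ih =>
    intro i
    unfold pvAInnerStr pvBScan
    split
    · split
      · have hge := pvBScan_ge '"' l f (i + 2)
        rw [ih (i + 2)]
        rw [show pvBScan '"' l f (i + 2) - i = (pvBScan '"' l f (i + 2) - (i + 2)) + 2 from by omega,
          List.replicate_succ, List.replicate_succ]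
      · split
        · simp
        · have hge := pvBScan_ge '"' l f (i + 1)
          rw [ih (i + 1)]
          rw [show pvBScan '"' l f (i + 1) - i = (pvBScan '"' l f (i + 1) - (i + 1)) + 1 from by omega,
            List.replicate_succ]
    · simp

-- Main invariant: with the same (adequate) outer fuel, B's accumulator plus its pending
-- slice and A's tail from i make the same character list.
theorem pvBLoop_eq (l : List Char) (fuel : Nat) :
    ∀ i start parts, start ≤ i → l.length ≤ i + fuel →
    (pvBLoop l fuel i start parts).flatten =
      parts.flatten ++ (l.drop start).take (i - start) ++ pvAOuter l fuel i := by
  induction fuel with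
  | zero =>
    intro i start parts hs hf
    have ht : (l.drop start).take (i - start) = l.drop start := by
      apply List.take_of_length_le; simp; omega
    simp [pvBLoop, pvAOuter, ht]
  | succ f ih =>
    intro i start parts hs hf
    unfold pvBLoop pvAOuter
    split
    · rename_i h
      split
      · rename_i hguard
        have hge := pvBScan_ge l[i] l (l.length + 1) (i + 1)
        rw [ih _ _ _ (le_refl _) (by omega)]
        simp only [Nat.sub_self, List.take_zero, List.flatten_append, List.flatten_cons,
          List.flatten_nil, List.append_nil, List.append_assoc]
        rcases hguard with ⟨hq, hprev⟩
        rcases hq with hq | hq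
        · -- opening "'": A takes its first branch
          rw [if_pos ⟨hq, hprev⟩]
          rw [pvAInnerChar_eq_scan l (l.length + 1) (i + 1)]
          simp only [hq]
          rw [hq] at hge
          rw [show pvBScan '\'' l (l.length + 1) (i + 1) - i
                = (pvBScan '\'' l (l.length + 1) (i + 1) - (i + 1)) + 1 from by omega,
            List.replicate_succ]
          simp
        · -- opening '"': A's first branch fails (l[i] = '"' ≠ '\''), second fires
          rw [if_neg (by simp [hq])]
          rw [if_pos ⟨hq, hprev⟩]
          rw [pvAInnerStr_eq_scan l (l.length + 1) (i + 1)]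
          simp only [hq]
          rw [hq] at hge
          rw [show pvBScan '"' l (l.length + 1) (i + 1) - i
                = (pvBScan '"' l (l.length + 1) (i + 1) - (i + 1)) + 1 from by omega,
            List.replicate_succ]
          simp
      · rename_i hguard
        rw [ih (i + 1) start parts (by omega) (by omega)]
        have hA1 : ¬ (l[i] = '\'' ∧ (i = 0 ∨ l.getD (i - 1) ' ' ≠ '\\')) := by
          intro ⟨hq, hp⟩; exact hguard ⟨Or.inl hq, hp⟩
        have hA2 : ¬ (l[i] = '"' ∧ (i = 0 ∨ l.getD (i - 1) ' ' ≠ '\\')) := by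
          intro ⟨hq, hp⟩; exact hguard ⟨Or.inr hq, hp⟩
        rw [if_neg hA1, if_neg hA2]
        have htake : (l.drop start).take (i + 1 - start) =
            (l.drop start).take (i - start) ++ [l[i]] := by
          rw [show i + 1 - start = (i - start) + 1 from by omega, List.take_add_one]
          have hg : (l.drop start)[i - start]? = some l[i] := by
            rw [List.getElem?_drop, show start + (i - start) = i from by omega]
            exact List.getElem?_eq_getElem h
          simp [hg]
        rw [htake]
        simp
    · rename_i h
      have ht : (l.drop start).take (i - start) = l.drop start := by
        apply List.take_of_length_le; simp; omega
      simp [ht]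

-- ===== VERDICT (by name: the statement is the Claim_ definition above) =====
theorem strip_strings_and_chars_py_spec : Claim_equal_strip_strings_and_chars_py := by
  intro line _
  unfold Spec_strip_strings_and_chars_py strip_strings_and_chars_py strip_strings_and_chars_py_alt
  rw [pvBLoop_eq line.toList (line.toList.length + 1) 0 0 [] (le_refl 0) (by omega)]
  simp
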